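-- pv_equiv track=rewrite | github.com/interuss/dss | monitoring/prober/utils.py | encode_owner
-- ===== SOURCE A (Python) =====
-- import math
--
-- ID_CHAR_SET = '0123456789ABCDEFGHIJKLMNOPQRSTUVWXYZabcdefghijklmnopqrstuvwxyz_'
--
-- MAX_OWNER_LENGTH = 12  # characters
--
-- def bin_to_hex(bin_string):
--   return format(int(bin_string,2), "02x")
--
-- def dec_to_bin(num):
--   return format(num, "06b")
--
-- def split_by(string_val, num=8):
--   """Splits a string into substrings with a length of given number."""
--   return [string_val[i:i+num] for i in range(0, len(string_val), num)]
--
-- def get_ord_val(letter):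
--   """Encodes new ord value for ascii letters."""
--   v = ID_CHAR_SET.find(letter)
--   if v == -1:
--     v = 63
--   return v
--
-- def encode_owner(owner_name: str) -> str:
--   """Encode an owner name as a 18-character hexidecimal string"""
--   bits = ''
--   if len(owner_name) > MAX_OWNER_LENGTH:
--     string_val = owner_name[:math.ceil(MAX_OWNER_LENGTH/2)] + owner_name[-math.floor(MAX_OWNER_LENGTH/2):]
--   elif len(owner_name) < MAX_OWNER_LENGTH:
--     string_val = ('?' * (MAX_OWNER_LENGTH - len(owner_name))) + owner_name
--   else:
--     string_val = owner_name
--   for letter in string_val: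
--     ord_val = get_ord_val(letter)
--     bits += dec_to_bin(ord_val)
--   return ''.join((bin_to_hex(s) for s in split_by(bits)))
-- ===== SOURCE B (Python) =====
-- ID_CHAR_SET = '0123456789ABCDEFGHIJKLMNOPQRSTUVWXYZabcdefghijklmnopqrstuvwxyz_'
--
-- MAX_OWNER_LENGTH = 12  # characters
--
-- def encode_owner(owner_name: str) -> str:
--   """Encode an owner name as a 18-character hexadecimal string."""
--   if len(owner_name) > MAX_OWNER_LENGTH:
--     string_val = owner_name[:MAX_OWNER_LENGTH // 2] + owner_name[-(MAX_OWNER_LENGTH // 2):]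
--   elif len(owner_name) < MAX_OWNER_LENGTH:
--     string_val = '?' * (MAX_OWNER_LENGTH - len(owner_name)) + owner_name
--   else:
--     string_val = owner_name
--   num = 0
--   for letter in string_val:
--     v = ID_CHAR_SET.find(letter)
--     num = num * 64 + (v if v != -1 else 63)
--   return format(num, '018x')
-- ===== Notes on version B (the rewrite author's own statement) =====
-- stated objective: simpler
-- what changed: Replaces A's build-72-bit-string, split-into-8-char-bytes, per-byte hex formatting pipeline by one base-64 integer accumulation (num = num*64 + ord_val) followed by a single width-18 hex format, dropping split_by/bin_to_hex/dec_to_bin entirely.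
import Mathlib
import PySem

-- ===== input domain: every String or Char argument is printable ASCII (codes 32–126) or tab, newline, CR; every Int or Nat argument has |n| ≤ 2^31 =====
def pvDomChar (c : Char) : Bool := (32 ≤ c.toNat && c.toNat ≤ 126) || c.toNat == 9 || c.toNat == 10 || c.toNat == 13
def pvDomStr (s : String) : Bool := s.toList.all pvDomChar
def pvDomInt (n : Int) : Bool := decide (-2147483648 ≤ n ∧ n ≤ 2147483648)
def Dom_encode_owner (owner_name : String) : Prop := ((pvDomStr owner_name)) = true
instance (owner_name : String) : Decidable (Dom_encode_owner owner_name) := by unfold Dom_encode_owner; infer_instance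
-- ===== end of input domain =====

-- B replaces A's bit-string building, byte splitting and per-byte hex formatting by one base-64
-- accumulation and a single width-18 hex format (objective: simpler; same character selection).

-- ===== PORT A =====
-- ID_CHAR_SET (shared by both Pythons)
def pvIdCharSet : List Char :=
  "0123456789ABCDEFGHIJKLMNOPQRSTUVWXYZabcdefghijklmnopqrstuvwxyz_".toList

-- format(n, "0<w>b"/"0<w>x"): zero-padded fixed-width digits, helper shared by both ports;
-- exact for 0 ≤ n < base^w, which holds at every call site of either Python (values 0..63,
-- bytes < 256, and num < 64^12 = 16^18).
def pvPad (base w n : Nat) : List Char :=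
  match w with
  | 0 => []
  | w' + 1 => pvPad base w' (n / base) ++ [Nat.digitChar (n % base)]

-- int(bin_string, 2): exact for nonempty strings of '0'/'1' digits, the only ones A produces
def pvBinVal (s : List Char) : Nat :=
  s.foldl (fun a c => a * 2 + (if c = '1' then 1 else 0)) 0

def bin_to_hex (s : List Char) : List Char := pvPad 16 2 (pvBinVal s)

-- dec_to_bin: format(num, "06b"); the argument is always 0..63 here (so .toNat is exact)
def dec_to_bin (n : Int) : List Char := pvPad 2 6 n.toNat

def split_by (s : List Char) (num : Int) : List (List Char) :=
  (PySem.List.pyRange 0 s.length num).map (fun i => PySem.List.slice s (some i) (some (i + num)))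

def get_ord_val (c : Char) : Int :=
  let v := PySem.Chars.find pvIdCharSet [c]
  if v = -1 then 63 else v

-- math.ceil(12/2) = math.floor(12/2) = 6 (constant, folded here since floats are not ported)
def encode_owner (owner_name : String) : String :=
  let cs := owner_name.toList
  let string_val : List Char :=
    if cs.length > 12 then
      PySem.List.slice cs none (some 6) ++ PySem.List.slice cs (some (-6)) none
    else if cs.length < 12 then
      PySem.List.pyRepeat ['?'] (12 - (cs.length : Int)) ++ cs
    else cs
  let bits := string_val.foldl (fun b c => b ++ dec_to_bin (get_ord_val c)) []
  String.mk (PySem.Chars.join [] ((split_by bits 8).map bin_to_hex))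

-- ===== PORT B =====
-- MAX_OWNER_LENGTH // 2 = 6 (constant folded)
def encode_owner_alt (owner_name : String) : String :=
  let cs := owner_name.toList
  let string_val : List Char :=
    if cs.length > 12 then
      PySem.List.slice cs none (some 6) ++ PySem.List.slice cs (some (-6)) none
    else if cs.length < 12 then
      PySem.List.pyRepeat ['?'] (12 - (cs.length : Int)) ++ cs
    else cs
  let num : Int := string_val.foldl (fun n c =>
    let v := PySem.Chars.find pvIdCharSet [c]
    n * 64 + (if v = -1 then 63 else v)) 0
  String.mk (pvPad 16 18 num.toNat)

-- ===== PRECONDITION & SPEC =====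
def Spec_encode_owner (owner_name : String) (out : String) : Prop := out = encode_owner_alt owner_name
instance (owner_name : String) (out : String) : Decidable (Spec_encode_owner owner_name out) := by unfold Spec_encode_owner; infer_instance

-- ===== CLAIM (what is proved, stated in full; the proofs are below) =====
def Claim_equal_encode_owner : Prop := ∀ (owner_name : String), Dom_encode_owner owner_name → Spec_encode_owner owner_name (encode_owner owner_name)

-- ===== LEMMAS AND PROOFS =====

-- get_ord_val is a natural number < 64
lemma pv_find_go_bound (s : List Char) (c : Char) :
    ∀ x : Nat, PySem.Chars.find.go [c] s x = -1 ∨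
      ∃ r : Nat, PySem.Chars.find.go [c] s x = (r : Int) ∧ r < x + s.length := by
  induction s with
  | nil => intro x; left; rw [PySem.Chars.find.go.eq_1]; simp
  | cons h t ih =>
    intro x
    rw [PySem.Chars.find.go.eq_2]
    by_cases hp : [c].isPrefixOf (h :: t) = true
    · right; exact ⟨x, by simp [hp], by simp⟩
    · simp only [hp]
      rcases ih (x + 1) with h1 | ⟨r, hr, hlt⟩
      · left; simpa using h1
      · right; exact ⟨r, by simpa using hr, by simp at hlt ⊢; omega⟩

lemma pv_ord_spec (c : Char) : ∃ m : Nat, get_ord_val c = (m : Int) ∧ m < 64 := by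
  unfold get_ord_val
  rcases pv_find_go_bound pvIdCharSet c 0 with h | ⟨r, hr, hlt⟩
  · exact ⟨63, by rw [PySem.Chars.find.eq_1, h]; simp, by omega⟩
  · refine ⟨r, ?_, ?_⟩
    · rw [PySem.Chars.find.eq_1, hr]
      have h0 : (0 : Int) ≤ (r : Int) := Int.natCast_nonneg r
      have : (r : Int) ≠ -1 := by omega
      simp [this]
    · have : pvIdCharSet.length = 63 := by decide
      omega

def pvOrdN (c : Char) : Nat := (get_ord_val c).toNat

lemma pv_ordN_lt (c : Char) : pvOrdN c < 64 := by
  obtain ⟨m, hm, hlt⟩ := pv_ord_spec c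
  simp [pvOrdN, hm]; omega

lemma pv_ord_eq_cast (c : Char) : get_ord_val c = (pvOrdN c : Int) := by
  obtain ⟨m, hm, _⟩ := pv_ord_spec c
  simp [pvOrdN, hm]

-- pvPad basics
lemma pvPad_length (base w : Nat) : ∀ n : Nat, (pvPad base w n).length = w := by
  induction w with
  | zero => intro n; rfl
  | succ w ih => intro n; simp [pvPad, ih]

-- binary parse: fold from an accumulator
lemma pv_binval_from (s : List Char) :
    ∀ a : Nat, s.foldl (fun a c => a * 2 + (if c = '1' then 1 else 0)) a
      = a * 2 ^ s.length + pvBinVal s := by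
  induction s with
  | nil => intro a; simp [pvBinVal]
  | cons h t ih =>
    intro a
    simp only [List.foldl_cons, List.length_cons, pvBinVal]
    rw [ih, ih (0 * 2 + _)]
    ring

lemma pv_binval_append (s : List Char) (t : List Char) :
    pvBinVal (s ++ t) = pvBinVal s * 2 ^ t.length + pvBinVal t := by
  unfold pvBinVal
  rw [List.foldl_append]
  exact pv_binval_from t _

lemma pv_binval_lt (s : List Char) : pvBinVal s < 2 ^ s.length := by
  induction s with
  | nil => simp [pvBinVal]
  | cons h t ih =>
    have hfrom := pv_binval_from t (0 * 2 + (if h = '1' then 1 else 0))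
    have hbit : (0 * 2 + (if h = '1' then 1 else 0)) ≤ 1 := by split <;> omega
    have hmul : (0 * 2 + (if h = '1' then 1 else 0)) * 2 ^ t.length ≤ 1 * 2 ^ t.length :=
      Nat.mul_le_mul_right _ hbit
    show List.foldl _ _ (h :: t) < _
    rw [List.foldl_cons, hfrom, List.length_cons, pow_succ]
    omega

lemma pv_binval_snoc (s : List Char) (c : Char) :
    pvBinVal (s ++ [c]) = pvBinVal s * 2 + (if c = '1' then 1 else 0) := by
  rw [pv_binval_append]
  simp [pvBinVal]

lemma pv_binval_pad (w : Nat) : ∀ n : Nat, n < 2 ^ w → pvBinVal (pvPad 2 w n) = n := by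
  induction w with
  | zero => intro n h; interval_cases n; rfl
  | succ w ih =>
    intro n h
    show pvBinVal (pvPad 2 w (n / 2) ++ [Nat.digitChar (n % 2)]) = n
    rw [pv_binval_snoc, ih (n / 2) (by rw [pow_succ] at h; omega)]
    have h2 : n % 2 = 0 ∨ n % 2 = 1 := by omega
    rcases h2 with h2 | h2 <;> rw [h2] <;> simp [Nat.digitChar] <;> omega

-- hex digits split
lemma pvPad_hex_split (a : Nat) : ∀ (b n : Nat),
    pvPad 16 (a + b) n = pvPad 16 a (n / 16 ^ b) ++ pvPad 16 b (n % 16 ^ b) := by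
  intro b
  induction b generalizing a with
  | zero => intro n; simp [pvPad]
  | succ b ih =>
    intro n
    rw [show a + (b + 1) = (a + b) + 1 by omega]
    show pvPad 16 (a + b) (n / 16) ++ [Nat.digitChar (n % 16)]
      = pvPad 16 a (n / 16 ^ (b + 1)) ++ pvPad 16 (b + 1) (n % 16 ^ (b + 1))
    rw [ih a (n / 16)]
    have e1 : n / 16 / 16 ^ b = n / 16 ^ (b + 1) := by
      rw [Nat.div_div_eq_div_mul, pow_succ, mul_comm (16 ^ b) 16]
    have e2 : n % 16 ^ (b + 1) / 16 = n / 16 % 16 ^ b := by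
      rw [pow_succ, mul_comm, Nat.mod_mul_right_div_self]
    have e3 : n % 16 ^ (b + 1) % 16 = n % 16 := by
      exact Nat.mod_mod_of_dvd n (dvd_pow_self 16 (by omega))
    rw [e1, List.append_assoc]
    congr 1
    show pvPad 16 b (n / 16 % 16 ^ b) ++ [Nat.digitChar (n % 16)]
      = pvPad 16 b (n % 16 ^ (b + 1) / 16) ++ [Nat.digitChar (n % 16 ^ (b + 1) % 16)]
    rw [e2, e3]

-- join with empty separator is flatten
lemma pv_join_nil_eq_flatten : ∀ ls : List (List Char), PySem.Chars.join [] ls = ls.flatten := by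
  intro ls
  induction ls with
  | nil => simp [PySem.Chars.join_nil]
  | cons a l ih =>
    cases l with
    | nil => simp [PySem.Chars.join_singleton]
    | cons b m => rw [PySem.Chars.join_cons_cons, ih]; simp

-- split_by peels an 8-chunk
lemma pv_split_by_chunk (k : Nat) (s : List Char) (h : s.length = 8 * k + 8) :
    split_by s 8 = s.take 8 :: split_by (s.drop 8) 8 := by
  unfold split_by
  have hlen : (s.drop 8).length = 8 * k := by rw [List.length_drop, h]; omega
  rw [h, hlen]
  rw [PySem.List.pyRange_of_pos _ _ (by norm_num : (0:Int) < 8),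
      PySem.List.pyRange_of_pos _ _ (by norm_num : (0:Int) < 8)]
  have hk1 : (if (0:Int) < ((8 * k + 8 : Nat) : Int) then ((((8 * k + 8 : Nat) : Int) - 0 + 8 - 1) / 8).toNat else 0) = k + 1 := by
    rw [if_pos (by push_cast; omega)]
    rw [show (((8 * k + 8 : Nat) : Int) - 0 + 8 - 1) = 8 * ((k : Int) + 1) + 7 by push_cast; ring]
    rw [show (8 * ((k : Int) + 1) + 7) / 8 = (k : Int) + 1 by omega]
    simp
  have hk2 : (if (0:Int) < ((8 * k : Nat) : Int) then ((((8 * k : Nat) : Int) - 0 + 8 - 1) / 8).toNat else 0) = k := by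
    rcases Nat.eq_zero_or_pos k with hk | hk
    · subst hk; simp
    · rw [if_pos (by push_cast; omega)]
      rw [show (((8 * k : Nat) : Int) - 0 + 8 - 1) = 8 * (k : Int) + 7 by push_cast; ring]
      rw [show (8 * (k : Int) + 7) / 8 = (k : Int) by omega]
      simp
  rw [hk1, hk2]
  rw [List.range_succ_eq_map]
  simp only [List.map_cons, List.map_map]
  congr 1
  · have := PySem.List.slice_natCast s 0 8
    simpa using this
  · apply List.map_congr_left
    intro j _
    simp only [Function.comp]
    rw [show ((0 : Int) + 8 * (((Nat.succ j) : Nat) : Int)) = ((8 * j + 8 : Nat) : Int) by push_cast; ring]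
    rw [show ((8 * j + 8 : Nat) : Int) + 8 = ((8 * j + 8 + 8 : Nat) : Int) by push_cast; ring]
    rw [show ((0 : Int) + 8 * ((j : Nat) : Int)) = ((8 * j : Nat) : Int) by push_cast; ring]
    rw [show ((8 * j : Nat) : Int) + 8 = ((8 * j + 8 : Nat) : Int) by push_cast; ring]
    rw [PySem.List.slice_natCast, PySem.List.slice_natCast, List.drop_drop]
    rw [show 8 * j + 8 + 8 - (8 * j + 8) = 8 by omega, show 8 * j + 8 - 8 * j = 8 by omega]
    congr 2
    omega

-- main hex lemma: joining per-byte hex over the 8-chunks is one wide hex format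
lemma pv_hex_join (k : Nat) : ∀ bits : List Char, bits.length = 8 * k →
    PySem.Chars.join [] ((split_by bits 8).map bin_to_hex) = pvPad 16 (2 * k) (pvBinVal bits) := by
  induction k with
  | zero =>
    intro bits h
    have : bits = [] := List.eq_nil_of_length_eq_zero (by omega)
    subst this
    simp [split_by, PySem.List.pyRange, pvPad, PySem.Chars.join_nil]
  | succ k ih =>
    intro bits h
    rw [pv_split_by_chunk k bits (by omega)]
    simp only [List.map_cons]
    rw [pv_join_nil_eq_flatten, List.flatten_cons, ← pv_join_nil_eq_flatten]
    rw [ih (bits.drop 8) (by rw [List.length_drop, h]; omega)]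
    have hlenr : (bits.drop 8).length = 8 * k := by rw [List.length_drop, h]; omega
    have hval : pvBinVal bits = pvBinVal (bits.take 8) * 2 ^ (8 * k) + pvBinVal (bits.drop 8) := by
      conv_lhs => rw [← List.take_append_drop 8 bits]
      rw [pv_binval_append, hlenr]
    have hr_lt : pvBinVal (bits.drop 8) < 2 ^ (8 * k) := by
      have := pv_binval_lt (bits.drop 8); rwa [hlenr] at this
    have hpow : (16 : Nat) ^ (2 * k) = 2 ^ (8 * k) := by
      rw [show (16:Nat) = 2 ^ 4 from rfl, ← pow_mul]
      congr 1; omega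
    rw [show 2 * (k + 1) = 2 + 2 * k by omega, pvPad_hex_split 2 (2 * k) (pvBinVal bits), hpow]
    have hdiv : pvBinVal bits / 2 ^ (8 * k) = pvBinVal (bits.take 8) := by
      rw [hval, mul_comm, Nat.mul_add_div (Nat.pow_pos (by omega)), Nat.div_eq_of_lt hr_lt, Nat.add_zero]
    have hmod : pvBinVal bits % 2 ^ (8 * k) = pvBinVal (bits.drop 8) := by
      rw [hval, mul_comm, Nat.mul_add_mod, Nat.mod_eq_of_lt hr_lt]
    rw [hdiv, hmod]
    rfl

-- A's bit accumulation is a flatMap, and its parse is B's base-64 fold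
lemma pv_bits_eq_flatMap (l : List Char) :
    l.foldl (fun b c => b ++ dec_to_bin (get_ord_val c)) []
      = l.flatMap (fun c => dec_to_bin (get_ord_val c)) := by
  have := PySem.List.foldl_append_eq_flatMap (fun c => dec_to_bin (get_ord_val c)) l []
  simpa using this

lemma pv_bits_length (l : List Char) :
    (l.flatMap (fun c => dec_to_bin (get_ord_val c))).length = 6 * l.length := by
  induction l with
  | nil => simp
  | cons c t ih =>
    rw [List.flatMap_cons, List.length_append, ih]
    show (pvPad 2 6 _).length + 6 * t.length = 6 * (t.length + 1)
    rw [pvPad_length]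
    omega

lemma pv_binval_flatMap (l : List Char) :
    ∀ a : Nat, (l.flatMap (fun c => dec_to_bin (get_ord_val c))).foldl
        (fun a c => a * 2 + (if c = '1' then 1 else 0)) a
      = l.foldl (fun n c => n * 64 + pvOrdN c) a := by
  induction l with
  | nil => intro a; simp
  | cons c t ih =>
    intro a
    rw [List.flatMap_cons, List.foldl_append, List.foldl_cons]
    have hpadfold : List.foldl (fun a c => a * 2 + (if c = '1' then 1 else 0)) a
        (dec_to_bin (get_ord_val c)) = a * 64 + pvOrdN c := by
      show List.foldl _ a (pvPad 2 6 (pvOrdN c)) = _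
      rw [pv_binval_from, pvPad_length, pv_binval_pad 6 _ (pv_ordN_lt c)]
      norm_num
    rw [hpadfold, ih]

-- B's Int fold is the cast of the Nat fold
lemma pv_int_fold (l : List Char) :
    ∀ a : Nat, l.foldl (fun n c =>
        let v := PySem.Chars.find pvIdCharSet [c]
        n * 64 + (if v = -1 then 63 else v)) ((a : Nat) : Int)
      = ((l.foldl (fun n c => n * 64 + pvOrdN c) a : Nat) : Int) := by
  induction l with
  | nil => intro a; simp
  | cons c t ih =>
    intro a
    rw [List.foldl_cons, List.foldl_cons]
    have hv : (let v := PySem.Chars.find pvIdCharSet [c]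
        ((a : Nat) : Int) * 64 + (if v = -1 then 63 else v)) = ((a * 64 + pvOrdN c : Nat) : Int) := by
      show ((a : Nat) : Int) * 64 + get_ord_val c = _
      rw [pv_ord_eq_cast]
      push_cast
      ring
    rw [hv, ih]

-- assembled core: for any 12-character string_val the two pipelines agree
lemma pv_main (sv : List Char) (hlen : sv.length = 12) :
    PySem.Chars.join [] ((split_by
        (sv.foldl (fun b c => b ++ dec_to_bin (get_ord_val c)) []) 8).map bin_to_hex)
      = pvPad 16 18 ((sv.foldl (fun n c =>
          let v := PySem.Chars.find pvIdCharSet [c]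
          n * 64 + (if v = -1 then 63 else v)) (0 : Int)).toNat) := by
  rw [pv_bits_eq_flatMap]
  have hblen : (sv.flatMap (fun c => dec_to_bin (get_ord_val c))).length = 8 * 9 := by
    rw [pv_bits_length, hlen]
  rw [pv_hex_join 9 _ hblen]
  have hnum : pvBinVal (sv.flatMap (fun c => dec_to_bin (get_ord_val c)))
      = sv.foldl (fun n c => n * 64 + pvOrdN c) 0 := pv_binval_flatMap sv 0
  have hint := pv_int_fold sv 0
  rw [show ((0 : Nat) : Int) = (0 : Int) by norm_num] at hint
  rw [hint, Int.toNat_natCast, ← hnum]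

-- the selected string always has 12 characters
lemma pv_stringval_length (cs : List Char) :
    (if cs.length > 12 then
      PySem.List.slice cs none (some 6) ++ PySem.List.slice cs (some (-6)) none
    else if cs.length < 12 then
      PySem.List.pyRepeat ['?'] (12 - (cs.length : Int)) ++ cs
    else cs).length = 12 := by
  split_ifs with h1 h2
  · rw [PySem.List.slice_to cs (by norm_num : (0:Int) ≤ 6),
      PySem.List.slice_from_neg_ofNat cs 6 (by omega)]
    simp
    omega
  · rw [PySem.List.pyRepeat_singleton]
    simp
    omega
  · omega

-- ===== VERDICT (by name: the statement is the Claim_ definition above) =====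
theorem encode_owner_spec : Claim_equal_encode_owner := by
  intro owner_name _
  show encode_owner owner_name = encode_owner_alt owner_name
  unfold encode_owner encode_owner_alt
  apply congrArg String.mk
  exact pv_main _ (pv_stringval_length owner_name.toList)
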